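-- pv_equiv track=rewrite | github.com/Kaeytee/chemlab-bot | prefix_generator.py | generate_prefix
-- ===== SOURCE A (Python) =====
-- def generate_prefix(n):
--     base_prefixes = [
--         "meth", "eth", "prop", "but", "pent", "hex", "hept", "oct", "non", "dec"
--     ]
--
--     tens_prefixes = [
--         "dec", "icos", "tricos", "tetracos", "pentacos", "hexacos", "heptacos", "octacos", "nonacos"
--     ]
--
--     if n <= 10:
--         return base_prefixes[n - 1]
--     elif n < 100:
--         tens = n // 10
--         ones = n % 10
--         return tens_prefixes[tens - 1] + (ones > 0 and base_prefixes[ones - 1] or "")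
--     else:
--         hundreds = n // 100
--         remainder = n % 100
--         hundreds_prefix = base_prefixes[hundreds - 1] + "cent"
--         return hundreds_prefix + (remainder > 0 and generate_prefix(remainder) or "")
-- ===== SOURCE B (Python) =====
-- def generate_prefix(n):
--     base = [
--         "meth", "eth", "prop", "but", "pent", "hex", "hept", "oct", "non", "dec"
--     ]
--     tens_p = [
--         "dec", "icos", "tricos", "tetracos", "pentacos", "hexacos", "heptacos", "octacos", "nonacos"
--     ]
--     if n <= 10:
--         return base[n - 1]
--     parts = []
--     if n >= 100:
--         parts.append(base[n // 100 - 1] + "cent")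
--         n %= 100
--         if n == 0:
--             return "".join(parts)
--         if n <= 10:
--             parts.append(base[n - 1])
--             return "".join(parts)
--     parts.append(tens_p[n // 10 - 1])
--     if n % 10 > 0:
--         parts.append(base[n % 10 - 1])
--     return "".join(parts)
-- ===== Notes on version B (the rewrite author's own statement) =====
-- stated objective: alternative
-- what changed: B eliminates A's recursion: it decomposes n into hundreds/tens/ones directly, collects looked-up prefix parts in a list and joins them, instead of A's branch chain with a recursive call on n % 100.
-- outside the precondition, e.g. on generate_prefix(-10): A raises IndexError, B raises IndexError; on generate_prefix(1100): A raises IndexError, B raises IndexError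
import Mathlib
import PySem

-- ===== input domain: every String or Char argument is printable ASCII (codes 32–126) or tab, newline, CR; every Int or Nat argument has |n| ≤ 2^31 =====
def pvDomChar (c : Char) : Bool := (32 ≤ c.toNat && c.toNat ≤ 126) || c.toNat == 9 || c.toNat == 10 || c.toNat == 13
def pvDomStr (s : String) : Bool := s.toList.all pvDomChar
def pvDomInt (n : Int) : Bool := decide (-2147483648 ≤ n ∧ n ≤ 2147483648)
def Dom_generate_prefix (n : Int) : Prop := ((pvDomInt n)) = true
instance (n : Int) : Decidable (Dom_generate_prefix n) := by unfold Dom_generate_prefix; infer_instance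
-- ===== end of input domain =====

-- B replaces A's single shallow recursion by a non-recursive hundreds/tens/ones decomposition
-- that collects looked-up prefix parts in a list and joins them (objective: alternative).

-- ===== PORT A =====
def basePrefixesA : List String :=
  ["meth", "eth", "prop", "but", "pent", "hex", "hept", "oct", "non", "dec"]

def tensPrefixesA : List String :=
  ["dec", "icos", "tricos", "tetracos", "pentacos", "hexacos", "heptacos", "octacos", "nonacos"]

-- literal transliteration of A; list indexing via pyGet? (none = IndexError, excluded by Pre_)
def generate_prefix (n : Int) : String :=
  if n ≤ 10 then
    (PySem.List.pyGet? basePrefixesA (n - 1)).getD ""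
  else if n < 100 then
    let tens := PySem.Int.floordiv n 10
    let ones := PySem.Int.mod n 10
    ((PySem.List.pyGet? tensPrefixesA (tens - 1)).getD "") ++
      (if ones > 0 then (PySem.List.pyGet? basePrefixesA (ones - 1)).getD "" else "")
  else
    let hundreds := PySem.Int.floordiv n 100
    let remainder := PySem.Int.mod n 100
    let hundreds_prefix := ((PySem.List.pyGet? basePrefixesA (hundreds - 1)).getD "") ++ "cent"
    hundreds_prefix ++ (if remainder > 0 then generate_prefix remainder else "")
termination_by n.toNat
decreasing_by
  rw [PySem.Int.mod_eq_emod_of_pos (by norm_num : (0:Int) < 100)]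
  omega

-- ===== PORT B =====
def basePrefixesB : List String :=
  ["meth", "eth", "prop", "but", "pent", "hex", "hept", "oct", "non", "dec"]

def tensPrefixesB : List String :=
  ["dec", "icos", "tricos", "tetracos", "pentacos", "hexacos", "heptacos", "octacos", "nonacos"]

-- "".join(parts)
def joinPartsB (parts : List String) : String := PySem.Str.join "" parts

-- the tens/ones tail of Source B: tens prefix, plus the ones prefix when n % 10 > 0
def tensOnesPartsB (n : Int) : List String :=
  [(PySem.List.pyGet? tensPrefixesB (PySem.Int.floordiv n 10 - 1)).getD ""] ++
    (if PySem.Int.mod n 10 > 0 then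
      [(PySem.List.pyGet? basePrefixesB (PySem.Int.mod n 10 - 1)).getD ""] else [])

-- literal transliteration of Source B (early returns become nested ifs; parts list + join kept)
def generate_prefix_alt (n : Int) : String :=
  if n ≤ 10 then
    (PySem.List.pyGet? basePrefixesB (n - 1)).getD ""
  else if n ≥ 100 then
    let p0 := ((PySem.List.pyGet? basePrefixesB (PySem.Int.floordiv n 100 - 1)).getD "") ++ "cent"
    let m := PySem.Int.mod n 100
    if m = 0 then joinPartsB [p0]
    else if m ≤ 10 then joinPartsB [p0, (PySem.List.pyGet? basePrefixesB (m - 1)).getD ""]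
    else joinPartsB ([p0] ++ tensOnesPartsB m)
  else joinPartsB (tensOnesPartsB n)

-- ===== PRECONDITION & SPEC =====
-- Pre_ excludes exactly the inputs where A raises IndexError (list index out of range):
-- n ≤ -10 in the base lookup, and n ≥ 1100 in the hundreds lookup.
def Pre_generate_prefix (n : Int) : Prop := -9 ≤ n ∧ n ≤ 1099
instance (n : Int) : Decidable (Pre_generate_prefix n) := by unfold Pre_generate_prefix; infer_instance

def pvWitness_generate_prefix : Int := (111)

def Spec_generate_prefix (n : Int) (out : String) : Prop := out = generate_prefix_alt n
instance (n : Int) (out : String) : Decidable (Spec_generate_prefix n out) := by unfold Spec_generate_prefix; infer_instance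

-- ===== CLAIM =====
def Claim_equal_generate_prefix : Prop :=
  ∀ (n : Int), Dom_generate_prefix n → Pre_generate_prefix n → Spec_generate_prefix n (generate_prefix n)

-- ===== LEMMAS AND PROOFS =====

theorem joinPartsB_nil : joinPartsB [] = "" := by
  simp [joinPartsB, PySem.Str.join, PySem.Chars.join, List.intercalate]

theorem joinPartsB_cons (a : String) (xs : List String) :
    joinPartsB (a :: xs) = a ++ joinPartsB xs := by
  unfold joinPartsB
  cases xs with
  | nil => simp [PySem.Str.join, PySem.Chars.join, List.intercalate]
  | cons b ys => simp [PySem.Str.join, PySem.Chars.join, List.intercalate]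

theorem basePrefixes_eq : basePrefixesA = basePrefixesB := rfl

theorem tensPrefixes_eq : tensPrefixesA = tensPrefixesB := rfl

theorem gp_low (n : Int) (h : n ≤ 10) :
    generate_prefix n = (PySem.List.pyGet? basePrefixesB (n - 1)).getD "" := by
  rw [generate_prefix.eq_def, basePrefixes_eq]
  simp [h]

theorem gp_mid (n : Int) (h1 : ¬ n ≤ 10) (h2 : n < 100) :
    generate_prefix n = joinPartsB (tensOnesPartsB n) := by
  rw [generate_prefix.eq_def, basePrefixes_eq, tensPrefixes_eq]
  simp only [if_neg h1, if_pos h2, tensOnesPartsB, List.singleton_append]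
  rw [joinPartsB_cons]
  split <;> simp [joinPartsB_cons, joinPartsB_nil]

theorem alt_low (n : Int) (h : n ≤ 10) :
    generate_prefix_alt n = (PySem.List.pyGet? basePrefixesB (n - 1)).getD "" := by
  rw [generate_prefix_alt]
  simp [h]

theorem alt_mid (n : Int) (h1 : ¬ n ≤ 10) (h2 : n < 100) :
    generate_prefix_alt n = joinPartsB (tensOnesPartsB n) := by
  rw [generate_prefix_alt]
  have h3 : ¬ n ≥ 100 := by omega
  simp [if_neg h1, if_neg h3]

theorem gp_high (n : Int) (h1 : ¬ n ≤ 10) (h2 : ¬ n < 100) (h3 : n ≤ 1099) :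
    generate_prefix n = generate_prefix_alt n := by
  have hge : n ≥ 100 := by omega
  have hm : PySem.Int.mod n 100 = n % 100 :=
    PySem.Int.mod_eq_emod_of_pos (by norm_num)
  have hm0 : 0 ≤ PySem.Int.mod n 100 := by
    rw [hm]; exact Int.emod_nonneg n (by norm_num)
  have hm99 : PySem.Int.mod n 100 < 100 := by
    rw [hm]; exact Int.emod_lt_of_pos n (by norm_num)
  rw [generate_prefix.eq_def, basePrefixes_eq]
  conv_rhs => rw [generate_prefix_alt]
  simp only [if_neg h1, if_neg h2, if_pos hge]
  by_cases hz : PySem.Int.mod n 100 = 0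
  · rw [if_pos hz, if_neg (show ¬ PySem.Int.mod n 100 > 0 by omega),
      joinPartsB_cons, joinPartsB_nil]
  · have hpos : PySem.Int.mod n 100 > 0 := by omega
    rw [if_pos hpos, if_neg hz]
    by_cases hle : PySem.Int.mod n 100 ≤ 10
    · rw [if_pos hle, gp_low _ hle, joinPartsB_cons, joinPartsB_cons, joinPartsB_nil]
      simp
    · rw [if_neg hle, gp_mid _ hle (by omega), List.singleton_append, joinPartsB_cons]

-- ===== VERDICT =====
theorem generate_prefix_spec : Claim_equal_generate_prefix := by
  intro n _ hpre
  unfold Spec_generate_prefix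
  by_cases h1 : n ≤ 10
  · rw [gp_low n h1, alt_low n h1]
  · by_cases h2 : n < 100
    · rw [gp_mid n h1 h2, alt_mid n h1 h2]
    · exact gp_high n h1 h2 hpre.2
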